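-- pv_equiv track=rewrite | github.com/version0-1/wiki-extract | wiki_extract/sql_categorylinks.py | _build_category_page_id_set
-- ===== SOURCE A (Python) =====
-- def _build_category_page_id_set(
--     subcat_rows_by_lt: list[tuple[int, int]],
--     lt_id_to_page_id: dict[int, int],
--     seed_page_id: int,
-- ) -> set[int]:
--     """
--     固定点: seed_page_id 配下の全カテゴリの page_id。
--     subcat_rows_by_lt = (cl_from=サブカテゴリの page_id, cl_target_id=親の lt_id)。
--     """
--     c: set[int] = {seed_page_id}
--     prev_size = 0
--     while len(c) > prev_size:
--         prev_size = len(c)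
--         for cl_from, parent_lt_id in subcat_rows_by_lt:
--             parent_page_id = lt_id_to_page_id.get(parent_lt_id)
--             if parent_page_id not in c:
--                 continue
--             c.add(cl_from)
--     return c
-- ===== SOURCE B (Python) =====
-- def _build_category_page_id_set(
--     subcat_rows_by_lt,
--     lt_id_to_page_id,
--     seed_page_id,
-- ):
--     # Graph search instead of fixed-point iteration: resolve each row's parent
--     # lt_id through the dict once, group the children under their parent
--     # page_id in an adjacency map, then one BFS from the seed visits every
--     # reachable category exactly once.
--     children = {}
--     for child, lt in subcat_rows_by_lt:
--         parent = lt_id_to_page_id.get(lt)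
--         if parent is not None:
--             children.setdefault(parent, []).append(child)
--     visited = {seed_page_id}
--     queue = [seed_page_id]
--     i = 0
--     while i < len(queue):
--         node = queue[i]
--         i += 1
--         for ch in children.get(node, []):
--             if ch not in visited:
--                 visited.add(ch)
--                 queue.append(ch)
--     return visited
-- ===== Notes on version B (the rewrite author's own statement) =====
-- stated objective: alternative
-- what changed: Replaces A's fixed-point iteration (rescan the whole edge list, with a dict lookup per edge, on every pass until the set stops growing) by a graph search: parents are resolved through the dict once, children are grouped under their parent page_id in an adjacency map, and a single BFS from the seed visits each reachable category exactly once.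
import Mathlib
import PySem

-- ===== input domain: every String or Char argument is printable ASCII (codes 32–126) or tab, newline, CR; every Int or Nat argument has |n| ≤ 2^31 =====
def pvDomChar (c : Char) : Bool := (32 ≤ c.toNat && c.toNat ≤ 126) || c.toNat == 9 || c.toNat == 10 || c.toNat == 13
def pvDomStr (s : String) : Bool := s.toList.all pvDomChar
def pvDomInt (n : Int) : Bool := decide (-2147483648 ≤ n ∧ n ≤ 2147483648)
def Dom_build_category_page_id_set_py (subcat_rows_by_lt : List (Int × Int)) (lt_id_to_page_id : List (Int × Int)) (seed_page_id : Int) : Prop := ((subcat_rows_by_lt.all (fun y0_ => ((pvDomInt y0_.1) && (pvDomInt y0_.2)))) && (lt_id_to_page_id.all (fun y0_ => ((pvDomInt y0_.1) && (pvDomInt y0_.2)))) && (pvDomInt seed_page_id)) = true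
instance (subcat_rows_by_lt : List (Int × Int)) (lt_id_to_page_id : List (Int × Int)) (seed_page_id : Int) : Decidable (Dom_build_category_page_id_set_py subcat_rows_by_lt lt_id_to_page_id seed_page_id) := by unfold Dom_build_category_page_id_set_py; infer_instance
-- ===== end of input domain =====

-- B replaces A's fixed-point iteration (full edge rescan per growth pass) by an
-- adjacency map plus a single BFS from the seed.  Both Pythons return a SET
-- (unordered; set outputs are compared as finite sets), so both ports return the
-- canonical sorted-list representation of that set.

-- ===== PORT A =====
-- one pass of A's inner 'for' loop over all rows (dict lookup per edge)
def pvPassA (subcat_rows_by_lt : List (Int × Int)) (lt_id_to_page_id : List (Int × Int)) (c : PySem.Set Int) : PySem.Set Int :=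
  subcat_rows_by_lt.foldl (fun c e =>
    match PySem.Dict.get? (PySem.Dict.mk lt_id_to_page_id) e.2 with
    | none => c                      -- parent_page_id is None: 'None not in c' → continue
    | some pp => if PySem.Set.contains c pp then PySem.Set.add c e.1 else c) c

-- A's 'while len(c) > prev_size' loop; fuel is a termination bound only
-- (each executed pass strictly grows c, and c never exceeds rows.length + 1 elements)
def pvLoopA (subcat_rows_by_lt lt_id_to_page_id : List (Int × Int)) : Nat → Int → PySem.Set Int → PySem.Set Int
  | 0, _, c => c
  | fuel + 1, prev_size, c =>
    if prev_size < (PySem.Set.len c : Int) then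
      pvLoopA subcat_rows_by_lt lt_id_to_page_id fuel (PySem.Set.len c) (pvPassA subcat_rows_by_lt lt_id_to_page_id c)
    else c

def build_category_page_id_set_py (subcat_rows_by_lt : List (Int × Int)) (lt_id_to_page_id : List (Int × Int)) (seed_page_id : Int) : List Int :=
  PySem.List.sorted (pvLoopA subcat_rows_by_lt lt_id_to_page_id (subcat_rows_by_lt.length + 2) 0 (PySem.Set.ofList [seed_page_id])) (fun x => x) false

-- ===== PORT B =====
-- Source B's first loop: children.setdefault(parent, []).append(child) after the one
-- dict lookup per row ('.setdefault(p, []).append(c)' is exactly 'modify p [] (· ++ [c])')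
def pvAdjB (subcat_rows_by_lt lt_id_to_page_id : List (Int × Int)) : PySem.Dict Int (List Int) :=
  subcat_rows_by_lt.foldl (fun d e =>
    match PySem.Dict.get? (PySem.Dict.mk lt_id_to_page_id) e.2 with
    | none => d                      -- parent is None: skipped
    | some pp => d.modify pp [] (· ++ [e.1])) PySem.Dict.empty

-- Source B's inner 'for ch in children.get(node, [])' body
def pvEnq (st : PySem.Set Int × List Int) (ch : Int) : PySem.Set Int × List Int :=
  if PySem.Set.contains st.1 ch then st else (PySem.Set.add st.1 ch, st.2 ++ [ch])

-- Source B's BFS loop; the read pointer i over 'queue' is ported as the unconsumed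
-- suffix queue[i:] (the pending list); fuel is a termination bound only (each
-- iteration consumes one enqueued node; enqueues ≤ rows.length + 1 total)
def pvBFS (adj : PySem.Dict Int (List Int)) : Nat → PySem.Set Int → List Int → PySem.Set Int
  | 0, visited, _ => visited
  | _ + 1, visited, [] => visited
  | fuel + 1, visited, node :: pending =>
    let st := (PySem.Dict.getD adj node []).foldl pvEnq (visited, pending)
    pvBFS adj fuel st.1 st.2

def build_category_page_id_set_py_alt (subcat_rows_by_lt : List (Int × Int)) (lt_id_to_page_id : List (Int × Int)) (seed_page_id : Int) : List Int :=
  PySem.List.sorted (pvBFS (pvAdjB subcat_rows_by_lt lt_id_to_page_id) (subcat_rows_by_lt.length + 2) (PySem.Set.ofList [seed_page_id]) [seed_page_id]) (fun x => x) false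

-- ===== PRECONDITION & SPEC =====
def Spec_build_category_page_id_set_py (subcat_rows_by_lt : List (Int × Int)) (lt_id_to_page_id : List (Int × Int)) (seed_page_id : Int) (out : List Int) : Prop := out = build_category_page_id_set_py_alt subcat_rows_by_lt lt_id_to_page_id seed_page_id
instance (subcat_rows_by_lt : List (Int × Int)) (lt_id_to_page_id : List (Int × Int)) (seed_page_id : Int) (out : List Int) : Decidable (Spec_build_category_page_id_set_py subcat_rows_by_lt lt_id_to_page_id seed_page_id out) := by unfold Spec_build_category_page_id_set_py; infer_instance

-- ===== CLAIM (what is proved, stated in full; the proofs are below) =====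
def Claim_equal_build_category_page_id_set_py : Prop := ∀ (subcat_rows_by_lt : List (Int × Int)) (lt_id_to_page_id : List (Int × Int)) (seed_page_id : Int), Dom_build_category_page_id_set_py subcat_rows_by_lt lt_id_to_page_id seed_page_id → Spec_build_category_page_id_set_py subcat_rows_by_lt lt_id_to_page_id seed_page_id (build_category_page_id_set_py subcat_rows_by_lt lt_id_to_page_id seed_page_id)

-- ===== LEMMAS AND PROOFS =====

-- the (parent page_id, child page_id) edges both programs act on: rows whose
-- parent lt_id resolves through the dict
def pvE (rows m : List (Int × Int)) : List (Int × Int) :=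
  rows.filterMap (fun e =>
    match PySem.Dict.get? (PySem.Dict.mk m) e.2 with
    | some pp => some (pp, e.1)
    | none => none)

-- reachability from the seed along pvE: the set both programs compute
inductive pvReach (E : List (Int × Int)) (seed : Int) : Int → Prop
  | base : pvReach E seed seed
  | step (p c : Int) : (p, c) ∈ E → pvReach E seed p → pvReach E seed c

-- A's action on one resolved edge
def pvStep (c : PySem.Set Int) (e : Int × Int) : PySem.Set Int :=
  if PySem.Set.contains c e.1 then PySem.Set.add c e.2 else c

lemma pv_add_mem {c : List Int} {x : Int} (h : x ∈ c) : PySem.Set.add c x = c := by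
  simp [PySem.Set.add, pysem, h]

lemma pv_add_not_mem {c : List Int} {x : Int} (h : x ∉ c) : PySem.Set.add c x = c ++ [x] := by
  simp [PySem.Set.add, pysem, h]

lemma pvPassA_eq (rows m : List (Int × Int)) (c : PySem.Set Int) :
    pvPassA rows m c = (pvE rows m).foldl pvStep c := by
  induction rows generalizing c with
  | nil => rfl
  | cons e rows ih =>
    cases h : PySem.Dict.get? (PySem.Dict.mk m) e.2 with
    | none =>
      have ha : pvPassA (e :: rows) m c = pvPassA rows m c := by simp [pvPassA, h]
      have he : pvE (e :: rows) m = pvE rows m := by simp [pvE, h]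
      rw [ha, he]; exact ih c
    | some pp =>
      have ha : pvPassA (e :: rows) m c
          = pvPassA rows m (if PySem.Set.contains c pp then PySem.Set.add c e.1 else c) := by
        simp [pvPassA, h]
      have he : pvE (e :: rows) m = (pp, e.1) :: pvE rows m := by simp [pvE, h]
      rw [ha, he, List.foldl_cons]
      exact ih _

-- pvStep either leaves c unchanged or appends the edge's child
lemma pvStep_cases (c : PySem.Set Int) (e : Int × Int) :
    pvStep c e = c ∨ (e.1 ∈ c ∧ e.2 ∉ c ∧ pvStep c e = c ++ [e.2]) := by
  by_cases h1 : e.1 ∈ c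
  · by_cases h2 : e.2 ∈ c
    · exact Or.inl (by simp [pvStep, pysem, h1, pv_add_mem h2])
    · exact Or.inr ⟨h1, h2, by simp [pvStep, pysem, h1, pv_add_not_mem h2]⟩
  · exact Or.inl (by simp [pvStep, pysem, h1])

-- a pvStep fold only appends, and appends only edge children
lemma pvFold_prefix (l : List (Int × Int)) : ∀ c : PySem.Set Int,
    ∃ t, l.foldl pvStep c = c ++ t ∧ ∀ x ∈ t, x ∈ l.map Prod.snd := by
  induction l with
  | nil => exact fun c => ⟨[], by simp⟩
  | cons e l ih =>
    intro c
    rcases pvStep_cases c e with h | ⟨_, _, h⟩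
    · obtain ⟨t, ht, hm⟩ := ih c
      exact ⟨t, by rw [List.foldl_cons, h]; exact ht, fun x hx => by simp [hm x hx]⟩
    · obtain ⟨t, ht, hm⟩ := ih (c ++ [e.2])
      refine ⟨e.2 :: t, ?_, ?_⟩
      · rw [List.foldl_cons, h, ht]; simp
      · intro x hx
        rcases List.mem_cons.1 hx with hx | hx
        · subst hx; simp
        · simp [hm x hx]

lemma pvFold_nodup (l : List (Int × Int)) : ∀ c : PySem.Set Int, c.Nodup → (l.foldl pvStep c).Nodup := by
  induction l with
  | nil => exact fun c h => h
  | cons e l ih =>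
    intro c hc
    rw [List.foldl_cons]
    refine ih _ ?_
    unfold pvStep
    split
    · exact PySem.Set.nodup_add c e.2 hc
    · exact hc

lemma pvFold_sound {E : List (Int × Int)} {seed : Int} (l : List (Int × Int))
    (hl : ∀ e ∈ l, e ∈ E) : ∀ c : PySem.Set Int, (∀ x ∈ c, pvReach E seed x) →
    ∀ x ∈ l.foldl pvStep c, pvReach E seed x := by
  induction l with
  | nil => exact fun c hc => hc
  | cons e l ih =>
    intro c hc
    rw [List.foldl_cons]
    refine ih (fun e' he' => hl e' (List.mem_cons_of_mem _ he')) _ ?_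
    intro x hx
    unfold pvStep at hx
    split at hx
    · rename_i hcont
      rcases (PySem.Set.mem_add c e.2 x).1 hx with hx | hx
      · exact hc x hx
      · subst hx
        exact pvReach.step e.1 e.2 (by rw [Prod.mk.eta]; exact hl e (List.mem_cons_self ..)) (hc e.1 (by simpa [pysem] using hcont))
    · exact hc x hx

-- a fixed point of a pvStep fold is closed under its edges
lemma pvFold_fix_closed (l : List (Int × Int)) (c : PySem.Set Int)
    (hfix : l.foldl pvStep c = c) : ∀ e ∈ l, e.1 ∈ c → e.2 ∈ c := by
  induction l with
  | nil => intro e he; cases he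
  | cons e l ih =>
    rw [List.foldl_cons] at hfix
    rcases pvStep_cases c e with h | ⟨h1, h2, h⟩
    · rw [h] at hfix
      intro e' he' h1'
      rcases List.mem_cons.1 he' with he' | he'
      · -- pvStep c e = c with e.1 ∈ c forces e.2 ∈ c
        subst he'
        by_cases hmem : e'.2 ∈ c
        · exact hmem
        · exfalso
          have hstep : pvStep c e' = c ++ [e'.2] := by
            simp [pvStep, pysem, h1', pv_add_not_mem hmem]
          rw [h] at hstep
          simp at hstep
      · exact ih hfix e' he' h1'
    · exfalso
      rw [h] at hfix
      obtain ⟨t, ht, -⟩ := pvFold_prefix l (c ++ [e.2])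
      rw [ht] at hfix
      have hlen := congrArg List.length hfix
      simp at hlen

lemma pvReach_mem_pool {E : List (Int × Int)} {seed x : Int} (h : pvReach E seed x) :
    x ∈ seed :: E.map Prod.snd := by
  induction h with
  | base => exact List.mem_cons_self ..
  | step p c hmem _ _ => exact List.mem_cons_of_mem _ (List.mem_map_of_mem hmem)

lemma pv_nodup_subset_length {l l' : List Int} (h : l.Nodup) (hs : ∀ x ∈ l, x ∈ l') :
    l.length ≤ l'.length := by
  calc l.length = l.toFinset.card := (List.toFinset_card_of_nodup h).symm
    _ ≤ l'.toFinset.card := Finset.card_le_card (fun x hx => by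
        simp only [List.mem_toFinset] at *; exact hs x hx)
    _ ≤ l'.length := l'.toFinset_card_le

-- every set closed under E and containing the seed contains all reachable nodes
lemma pvReach_subset_closed {E : List (Int × Int)} {seed : Int} {S : List Int}
    (hseed : seed ∈ S) (hcl : ∀ e ∈ E, e.1 ∈ S → e.2 ∈ S) :
    ∀ x, pvReach E seed x → x ∈ S := by
  intro x h
  induction h with
  | base => exact hseed
  | step p c hmem _ ih => exact hcl (p, c) hmem ih

-- A's loop: starting strictly above prev_size with enough fuel, the result is a
-- fixed point of the pass, contains c, is Nodup and contains only reachable nodes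
lemma pvLoopA_char (rows m : List (Int × Int)) (seed : Int) : ∀ (fuel : Nat) (prev : Int) (c : PySem.Set Int),
    c.Nodup → (∀ x ∈ c, pvReach (pvE rows m) seed x) →
    (seed :: (pvE rows m).map Prod.snd).length + 1 ≤ fuel + c.length →
    prev < (c.length : Int) →
    (∀ x ∈ c, x ∈ pvLoopA rows m fuel prev c)
    ∧ (pvLoopA rows m fuel prev c).Nodup
    ∧ (∀ x ∈ pvLoopA rows m fuel prev c, pvReach (pvE rows m) seed x)
    ∧ (∀ e ∈ pvE rows m, e.1 ∈ pvLoopA rows m fuel prev c → e.2 ∈ pvLoopA rows m fuel prev c) := by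
  intro fuel
  induction fuel with
  | zero =>
    intro prev c hnd hsound hfuel _
    exfalso
    have hle : c.length ≤ (seed :: (pvE rows m).map Prod.snd).length :=
      pv_nodup_subset_length hnd (fun x hx => pvReach_mem_pool (hsound x hx))
    omega
  | succ fuel ih =>
    intro prev c hnd hsound hfuel hlt
    have hstep : pvLoopA rows m (fuel + 1) prev c
        = pvLoopA rows m fuel (PySem.Set.len c) (pvPassA rows m c) := by
      simp only [pvLoopA]
      rw [if_pos (by exact_mod_cast hlt)]
    obtain ⟨t, ht, -⟩ := pvFold_prefix (pvE rows m) c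
    have hpass : pvPassA rows m c = c ++ t := by rw [pvPassA_eq]; exact ht
    cases t with
    | nil =>
      -- the pass added nothing: next size check fails and the loop returns c, a fixed point
      rw [List.append_nil] at hpass
      have hstop : pvLoopA rows m fuel (PySem.Set.len c) c = c := by
        cases fuel with
        | zero => rfl
        | succ n =>
          simp only [pvLoopA]
          rw [if_neg (lt_irrefl _)]
      rw [hstep, hpass, hstop]
      refine ⟨fun x hx => hx, hnd, hsound, ?_⟩
      exact pvFold_fix_closed _ _ (by rw [← pvPassA_eq, hpass])
    | cons y t' =>
      have hnd' : (pvPassA rows m c).Nodup := by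
        rw [pvPassA_eq]; exact pvFold_nodup _ _ hnd
      have hsound' : ∀ x ∈ pvPassA rows m c, pvReach (pvE rows m) seed x := by
        rw [pvPassA_eq]; exact pvFold_sound _ (fun e he => he) _ hsound
      have hlen : c.length + 1 ≤ (pvPassA rows m c).length := by
        rw [hpass]; simp
      have hfuel' : (seed :: (pvE rows m).map Prod.snd).length + 1 ≤ fuel + (pvPassA rows m c).length := by
        omega
      have hlt' : (PySem.Set.len c : Int) < ((pvPassA rows m c).length : Int) := by
        have : PySem.Set.len c = c.length := rfl
        rw [this]; exact_mod_cast hlen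
      obtain ⟨g1, g2, g3, g4⟩ := ih (PySem.Set.len c) (pvPassA rows m c) hnd' hsound' hfuel' hlt'
      rw [hstep]
      exact ⟨fun x hx => g1 x (by rw [hpass]; exact List.mem_append_left _ hx), g2, g3, g4⟩

-- ch is a recorded child of q in B's adjacency map iff (q, ch) is a resolved edge
lemma pvAdjB_eq (rows m : List (Int × Int)) :
    pvAdjB rows m = (pvE rows m).foldl (fun d p => d.modify p.1 [] (· ++ [p.2])) PySem.Dict.empty := by
  have key : ∀ (rows : List (Int × Int)) (d : PySem.Dict Int (List Int)),
      rows.foldl (fun d e =>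
        match PySem.Dict.get? (PySem.Dict.mk m) e.2 with
        | none => d
        | some pp => d.modify pp [] (· ++ [e.1])) d
      = (pvE rows m).foldl (fun d p => d.modify p.1 [] (· ++ [p.2])) d := by
    intro rows
    induction rows with
    | nil => intro d; rfl
    | cons e rows ih =>
      intro d
      cases h : PySem.Dict.get? (PySem.Dict.mk m) e.2 with
      | none => rw [List.foldl_cons]; simp only [h]; rw [ih d, show pvE (e :: rows) m = pvE rows m by simp [pvE, h]]
      | some pp =>
        rw [List.foldl_cons]; simp only [h]
        rw [ih _, show pvE (e :: rows) m = (pp, e.1) :: pvE rows m by simp [pvE, h], List.foldl_cons]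
  exact key rows PySem.Dict.empty

lemma pv_mem_adj {rows m : List (Int × Int)} {q ch : Int} :
    ch ∈ (pvAdjB rows m).getD q [] ↔ (q, ch) ∈ pvE rows m := by
  rw [pvAdjB_eq, PySem.Dict.getD_foldl_modify_append]
  simp only [PySem.Dict.getD_empty, List.nil_append, List.mem_map, List.mem_filter]
  constructor
  · rintro ⟨p, ⟨hp, hq⟩, rfl⟩
    have : p.1 = q := by simpa using hq
    rwa [show ((q, p.2) : Int × Int) = p by rw [← this]]
  · intro h
    exact ⟨(q, ch), ⟨h, by simp⟩, rfl⟩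

-- one run of B's inner loop: the new nodes are appended to visited AND pending alike
lemma pvEnq_fold (chs : List Int) : ∀ (vis : PySem.Set Int) (pending : List Int),
    ∃ t, (chs.foldl pvEnq (vis, pending)).1 = vis ++ t
    ∧ (chs.foldl pvEnq (vis, pending)).2 = pending ++ t
    ∧ (∀ x ∈ t, x ∈ chs)
    ∧ (∀ ch ∈ chs, ch ∈ (chs.foldl pvEnq (vis, pending)).1)
    ∧ (vis.Nodup → (chs.foldl pvEnq (vis, pending)).1.Nodup) := by
  induction chs with
  | nil => exact fun vis pending => ⟨[], by simp⟩
  | cons ch chs ih =>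
    intro vis pending
    rw [List.foldl_cons]
    by_cases h : ch ∈ vis
    · have he : pvEnq (vis, pending) ch = (vis, pending) := by simp [pvEnq, pysem, h]
      rw [he]
      obtain ⟨t, h1, h2, h3, h4, h5⟩ := ih vis pending
      refine ⟨t, h1, h2, fun x hx => List.mem_cons_of_mem _ (h3 x hx), ?_, h5⟩
      intro c hc
      rcases List.mem_cons.1 hc with hc | hc
      · subst hc; rw [h1]; exact List.mem_append_left _ h
      · exact h4 c hc
    · have he : pvEnq (vis, pending) ch = (vis ++ [ch], pending ++ [ch]) := by
        simp [pvEnq, pysem, h]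
      rw [he]
      obtain ⟨t, h1, h2, h3, h4, h5⟩ := ih (vis ++ [ch]) (pending ++ [ch])
      refine ⟨ch :: t, by rw [h1]; simp, by rw [h2]; simp, ?_, ?_, ?_⟩
      · intro x hx
        rcases List.mem_cons.1 hx with hx | hx
        · subst hx; exact List.mem_cons_self ..
        · exact List.mem_cons_of_mem _ (h3 x hx)
      · intro c hc
        rcases List.mem_cons.1 hc with hc | hc
        · subst hc; rw [h1]; simp
        · exact h4 c hc
      · intro hnd
        refine h5 ?_
        have : vis ++ [ch] = PySem.Set.add vis ch := (pv_add_not_mem h).symm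
        rw [this]
        exact PySem.Set.nodup_add vis ch hnd

-- B's BFS loop: with the queue invariants and enough fuel the result is the same
-- Nodup set of reachable nodes, closed under the resolved edges
lemma pvBFS_char (rows m : List (Int × Int)) (seed : Int) : ∀ (fuel : Nat) (vis : PySem.Set Int) (pending : List Int),
    vis.Nodup → (∀ x ∈ pending, x ∈ vis) →
    (∀ x ∈ vis, pvReach (pvE rows m) seed x) →
    (∀ v ∈ vis, v ∈ pending ∨ ∀ ch, (v, ch) ∈ pvE rows m → ch ∈ vis) →
    (seed :: (pvE rows m).map Prod.snd).length + pending.length + 1 ≤ fuel + vis.length →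
    (∀ x ∈ vis, x ∈ pvBFS (pvAdjB rows m) fuel vis pending)
    ∧ (pvBFS (pvAdjB rows m) fuel vis pending).Nodup
    ∧ (∀ x ∈ pvBFS (pvAdjB rows m) fuel vis pending, pvReach (pvE rows m) seed x)
    ∧ (∀ e ∈ pvE rows m, e.1 ∈ pvBFS (pvAdjB rows m) fuel vis pending → e.2 ∈ pvBFS (pvAdjB rows m) fuel vis pending) := by
  intro fuel
  induction fuel with
  | zero =>
    intro vis pending hnd hpv hsound _ hfuel
    exfalso
    have hle : vis.length ≤ (seed :: (pvE rows m).map Prod.snd).length :=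
      pv_nodup_subset_length hnd (fun x hx => pvReach_mem_pool (hsound x hx))
    omega
  | succ fuel ih =>
    intro vis pending hnd hpv hsound hcl hfuel
    cases pending with
    | nil =>
      refine ⟨fun x hx => hx, hnd, hsound, ?_⟩
      intro e he h1
      rcases hcl e.1 h1 with h | h
      · cases h
      · exact h e.2 he
    | cons node rest =>
      have hshape : pvBFS (pvAdjB rows m) (fuel + 1) vis (node :: rest)
          = pvBFS (pvAdjB rows m) fuel
              (((pvAdjB rows m).getD node []).foldl pvEnq (vis, rest)).1
              (((pvAdjB rows m).getD node []).foldl pvEnq (vis, rest)).2 := rfl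
      obtain ⟨t, h1, h2, h3, h4, h5⟩ := pvEnq_fold ((pvAdjB rows m).getD node []) vis rest
      have hnode : node ∈ vis := hpv node (List.mem_cons_self ..)
      have hsub : ∀ x ∈ vis, x ∈ vis ++ t := fun x hx => List.mem_append_left _ hx
      have hsound' : ∀ x ∈ vis ++ t, pvReach (pvE rows m) seed x := by
        intro x hx
        rcases List.mem_append.1 hx with hx | hx
        · exact hsound x hx
        · exact pvReach.step node x (pv_mem_adj.1 (h3 x hx)) (hsound node hnode)
      have hpv' : ∀ x ∈ rest ++ t, x ∈ vis ++ t := by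
        intro x hx
        rcases List.mem_append.1 hx with hx | hx
        · exact List.mem_append_left _ (hpv x (List.mem_cons_of_mem _ hx))
        · exact List.mem_append_right _ hx
      have hcl' : ∀ v ∈ vis ++ t, v ∈ rest ++ t ∨ ∀ ch, (v, ch) ∈ pvE rows m → ch ∈ vis ++ t := by
        intro v hv
        rcases List.mem_append.1 hv with hv | hv
        · rcases hcl v hv with h | h
          · rcases List.mem_cons.1 h with h | h
            · subst h
              right
              intro ch hch
              rw [← h1]; exact h4 ch (pv_mem_adj.2 hch)
            · exact Or.inl (List.mem_append_left _ h)
          · exact Or.inr fun ch hch => List.mem_append_left _ (h ch hch)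
        · exact Or.inl (List.mem_append_right _ hv)
      have hfuel' : (seed :: (pvE rows m).map Prod.snd).length + (rest ++ t).length + 1
          ≤ fuel + (vis ++ t).length := by
        simp only [List.length_append] at *
        simp only [List.length_cons] at hfuel ⊢
        omega
      obtain ⟨g1, g2, g3, g4⟩ := ih (vis ++ t) (rest ++ t) (h1 ▸ h5 hnd) hpv' hsound' hcl' hfuel'
      rw [hshape, h1, h2]
      exact ⟨fun x hx => g1 x (hsub x hx), g2, g3, g4⟩

-- both ports compute exactly the reachable set; membership characterizations
lemma pvA_char (rows m : List (Int × Int)) (seed : Int) :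
    (pvLoopA rows m (rows.length + 2) 0 (PySem.Set.ofList [seed])).Nodup
    ∧ ∀ x, x ∈ pvLoopA rows m (rows.length + 2) 0 (PySem.Set.ofList [seed]) ↔ pvReach (pvE rows m) seed x := by
  have hof : PySem.Set.ofList [seed] = [seed] := by
    simp [PySem.Set.ofList, PySem.Set.add, PySem.Set.empty]
  have hElen : (pvE rows m).length ≤ rows.length := List.length_filterMap_le _ _
  obtain ⟨g1, g2, g3, g4⟩ := pvLoopA_char rows m seed (rows.length + 2) 0 (PySem.Set.ofList [seed])
    (by rw [hof]; exact List.nodup_singleton _)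
    (by rw [hof]; intro x hx; rw [List.mem_singleton] at hx; subst hx; exact pvReach.base)
    (by rw [hof]; simp only [List.length_cons, List.length_map]; omega)
    (by rw [hof]; norm_num)
  refine ⟨g2, fun x => ⟨g3 x, ?_⟩⟩
  intro hx
  refine pvReach_subset_closed ?_ g4 x hx
  exact g1 seed (by rw [hof]; exact List.mem_singleton.2 rfl)

lemma pvB_char (rows m : List (Int × Int)) (seed : Int) :
    (pvBFS (pvAdjB rows m) (rows.length + 2) (PySem.Set.ofList [seed]) [seed]).Nodup
    ∧ ∀ x, x ∈ pvBFS (pvAdjB rows m) (rows.length + 2) (PySem.Set.ofList [seed]) [seed] ↔ pvReach (pvE rows m) seed x := by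
  have hof : PySem.Set.ofList [seed] = [seed] := by
    simp [PySem.Set.ofList, PySem.Set.add, PySem.Set.empty]
  have hElen : (pvE rows m).length ≤ rows.length := List.length_filterMap_le _ _
  rw [hof]
  obtain ⟨g1, g2, g3, g4⟩ := pvBFS_char rows m seed (rows.length + 2) [seed] [seed]
    (List.nodup_singleton _)
    (fun x hx => hx)
    (by intro x hx; rw [List.mem_singleton] at hx; subst hx; exact pvReach.base)
    (fun v hv => Or.inl hv)
    (by simp only [List.length_cons, List.length_map]; omega)
  refine ⟨g2, fun x => ⟨g3 x, ?_⟩⟩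
  intro hx
  refine pvReach_subset_closed ?_ g4 x hx
  exact g1 seed (List.mem_singleton.2 rfl)

-- ===== VERDICT (by name: the statement is the Claim_ definition above) =====
theorem build_category_page_id_set_py_spec : Claim_equal_build_category_page_id_set_py := by
  intro rows m seed _
  unfold Spec_build_category_page_id_set_py build_category_page_id_set_py build_category_page_id_set_py_alt
  obtain ⟨hndA, hA⟩ := pvA_char rows m seed
  obtain ⟨hndB, hB⟩ := pvB_char rows m seed
  refine PySem.List.sorted_eq_sorted_of_perm _ _ _ (fun a b h => h) ?_
  exact (List.perm_ext_iff_of_nodup hndA hndB).2 (fun x => (hA x).trans (hB x).symm)
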